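-- pv_equiv track=rewrite | github.com/hkhcc/GolayMetaMiner | gmm.py | detect_roi
-- ===== SOURCE A (Python) =====
-- def detect_roi(u_array, c_array, u_cutoff, min_length=50):
--     """Report u_array regions that are above u_cutoff"""
--     roi = list()
--     in_region = False
--     base_pos = 1
--     for u_score, c_score in zip(u_array, c_array):
--         if in_region == False and u_score >= u_cutoff:
--             in_region = True # turn on recording
--             roi.append([base_pos, 0])
--         elif in_region == True and u_score >= u_cutoff:
--             pass
--         elif in_region == True and u_score < u_cutoff:
--             in_region = False # turn off recording
--             roi[-1][1] = base_pos
--         else: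
--             pass
--         base_pos += 1
--     len_filtered_roi = list()
--     for region in roi:
--         if (region[1] - region[0] + 1) >= min_length:
--             len_filtered_roi.append(region)
--     return len_filtered_roi
-- ===== SOURCE B (Python) =====
-- def detect_roi(u_array, c_array, u_cutoff, min_length=50):
--     """Report u_array regions that are above u_cutoff (run-scanner version).
--
--     A region is [start, end] with 1-based start and end = position of the
--     first below-cutoff score after the run; a run still open at the end of
--     the scanned range keeps end = 0 (no terminating position), as in the
--     original output format."""
--     above = [u >= u_cutoff for u, _ in zip(u_array, c_array)]
--     n = len(above)
--     regions = []
--     i = 0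
--     while i < n:
--         if above[i]:
--             j = i
--             while j < n and above[j]:
--                 j += 1
--             regions.append([i + 1, 0 if j == n else j + 1])
--             i = j + 1
--         else:
--             i += 1
--     return [r for r in regions if r[1] - r[0] + 1 >= min_length]
-- ===== Notes on version B (the rewrite author's own statement) =====
-- stated objective: simpler
-- what changed: Replaces A's per-element in_region/base_pos state machine (with in-place patching of the last region's end) by a precomputed above-cutoff flag list and a run scanner that emits each maximal run as a whole region, then a filter comprehension.
import Mathlib
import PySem

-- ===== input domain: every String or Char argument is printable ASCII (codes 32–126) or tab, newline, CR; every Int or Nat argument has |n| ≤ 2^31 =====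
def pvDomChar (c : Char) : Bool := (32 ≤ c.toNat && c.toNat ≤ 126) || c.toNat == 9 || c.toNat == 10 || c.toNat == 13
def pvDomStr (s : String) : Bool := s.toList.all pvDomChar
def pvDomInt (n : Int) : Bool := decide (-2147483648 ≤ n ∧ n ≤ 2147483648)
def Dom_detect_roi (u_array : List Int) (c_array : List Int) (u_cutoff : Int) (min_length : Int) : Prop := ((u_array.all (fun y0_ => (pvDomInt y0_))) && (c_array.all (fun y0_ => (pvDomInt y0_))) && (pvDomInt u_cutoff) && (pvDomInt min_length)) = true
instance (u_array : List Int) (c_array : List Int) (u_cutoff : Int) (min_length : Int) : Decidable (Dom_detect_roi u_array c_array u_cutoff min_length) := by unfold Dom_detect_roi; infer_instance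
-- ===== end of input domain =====

-- B replaces A's per-element in_region state machine by a run scanner over the
-- above-cutoff flags (objective: simpler decomposition); same return value,
-- including end = 0 for a run still open at the end of the scanned range.

-- ===== PORT A =====
-- roi[-1][1] = base_pos  (set index 1 of the last region)
def setEnd : List (List Int) → Int → List (List Int)
  | [], _ => []
  | [r], pos => [r.set 1 pos]
  | x :: y :: xs, pos => x :: setEnd (y :: xs) pos

-- one iteration of A's for-loop over (u_score, c_score); state = (roi, in_region, base_pos)
def stepA (u_cutoff : Int) (st : List (List Int) × Bool × Int) (p : Int × Int) :
    List (List Int) × Bool × Int :=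
  let roi := st.1; let inr := st.2.1; let pos := st.2.2
  if inr = false ∧ p.1 ≥ u_cutoff then (roi ++ [[pos, 0]], true, pos + 1)
  else if inr = true ∧ p.1 ≥ u_cutoff then (roi, true, pos + 1)
  else if inr = true ∧ p.1 < u_cutoff then (setEnd roi pos, false, pos + 1)
  else (roi, false, pos + 1)

def detect_roi (u_array : List Int) (c_array : List Int) (u_cutoff : Int) (min_length : Int) : List (List Int) :=
  let st := (u_array.zip c_array).foldl (stepA u_cutoff) ([], false, 1)
  st.1.foldl (fun acc r => if r.getD 1 0 - r.getD 0 0 + 1 ≥ min_length then acc ++ [r] else acc) []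

-- ===== PORT B =====
-- run scanner: skip a below-cutoff flag; on an above-cutoff flag take the whole
-- maximal run at once (the inner `while j` scan = length of leading true flags),
-- emit the region, and resume after the terminating below-cutoff flag
def altRuns : List Bool → Int → List (List Int)
  | [], _ => []
  | false :: rest, pos => altRuns rest (pos + 1)
  | true :: rest, pos =>
      let k := (rest.takeWhile (fun b => b)).length
      if k = rest.length then [[pos, 0]]
      else [pos, pos + (k : Int) + 1] :: altRuns (rest.drop (k + 1)) (pos + (k : Int) + 2)
termination_by flags _ => flags.length
decreasing_by
· simp
· simp only [List.length_cons]
  have h : (rest.drop ((rest.takeWhile (fun b => b)).length + 1)).length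
      = rest.length - ((rest.takeWhile (fun b => b)).length + 1) := List.length_drop
  omega

def detect_roi_alt (u_array : List Int) (c_array : List Int) (u_cutoff : Int) (min_length : Int) : List (List Int) :=
  let above := (u_array.zip c_array).map (fun p => decide (p.1 ≥ u_cutoff))
  (altRuns above 1).filter (fun r => decide (r.getD 1 0 - r.getD 0 0 + 1 ≥ min_length))

-- ===== PRECONDITION & SPEC =====
def Spec_detect_roi (u_array : List Int) (c_array : List Int) (u_cutoff : Int) (min_length : Int) (out : List (List Int)) : Prop := out = detect_roi_alt u_array c_array u_cutoff min_length
instance (u_array : List Int) (c_array : List Int) (u_cutoff : Int) (min_length : Int) (out : List (List Int)) : Decidable (Spec_detect_roi u_array c_array u_cutoff min_length out) := by unfold Spec_detect_roi; infer_instance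

-- ===== CLAIM (what is proved, stated in full; the proofs are below) =====
def Claim_equal_detect_roi : Prop := ∀ (u_array : List Int) (c_array : List Int) (u_cutoff : Int) (min_length : Int), Dom_detect_roi u_array c_array u_cutoff min_length → Spec_detect_roi u_array c_array u_cutoff min_length (detect_roi u_array c_array u_cutoff min_length)

-- ===== LEMMAS AND PROOFS =====

-- A's step, on the boolean flag (u_score ≥ u_cutoff) alone
def stepF (st : List (List Int) × Bool × Int) (b : Bool) : List (List Int) × Bool × Int :=
  match st.2.1, b with
  | false, true => (st.1 ++ [[st.2.2, 0]], true, st.2.2 + 1)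
  | true, true => (st.1, true, st.2.2 + 1)
  | true, false => (setEnd st.1 st.2.2, false, st.2.2 + 1)
  | false, false => (st.1, false, st.2.2 + 1)

theorem stepA_eq_stepF (c : Int) (st : List (List Int) × Bool × Int) (p : Int × Int) :
    stepA c st p = stepF st (decide (p.1 ≥ c)) := by
  obtain ⟨roi, inr, pos⟩ := st
  by_cases h : p.1 ≥ c <;> cases inr <;>
    simp [stepA, stepF, h, not_le.mp]

theorem foldA_eq_foldF (c : Int) (zs : List (Int × Int)) (st : List (List Int) × Bool × Int) :
    zs.foldl (stepA c) st = (zs.map (fun p => decide (p.1 ≥ c))).foldl stepF st := by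
  induction zs generalizing st with
  | nil => rfl
  | cons z zs ih => simp [List.foldl, stepA_eq_stepF, ih]

-- elementwise description of the run regions:
-- closedRes = not inside a run, openRes s = inside a run that started at position s
mutual
def closedRes : List Bool → Int → List (List Int)
  | [], _ => []
  | false :: rest, pos => closedRes rest (pos + 1)
  | true :: rest, pos => openRes pos rest (pos + 1)
def openRes (s : Int) : List Bool → Int → List (List Int)
  | [], _ => [[s, 0]]
  | true :: rest, pos => openRes s rest (pos + 1)
  | false :: rest, pos => [s, pos] :: closedRes rest (pos + 1)
end

theorem setEnd_append (acc : List (List Int)) (s e pos : Int) :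
    setEnd (acc ++ [[s, e]]) pos = acc ++ [[s, pos]] := by
  induction acc with
  | nil => rfl
  | cons x xs ih =>
      cases xs with
      | nil => simpa [setEnd] using ih
      | cons y ys => simpa [setEnd] using ih

theorem foldF_char (flags : List Bool) :
    (∀ acc pos, (flags.foldl stepF (acc, false, pos)).1 = acc ++ closedRes flags pos) ∧
    (∀ acc s pos, (flags.foldl stepF (acc ++ [[s, 0]], true, pos)).1 = acc ++ openRes s flags pos) := by
  induction flags with
  | nil => simp [closedRes, openRes]
  | cons b rest ih =>
      cases b with
      | false =>
          constructor
          · intro acc pos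
            simpa [List.foldl, stepF, closedRes] using ih.1 acc (pos + 1)
          · intro acc s pos
            have h := ih.1 (acc ++ [[s, pos]]) (pos + 1)
            simp only [List.foldl, stepF, setEnd_append, openRes]
            simpa [List.append_assoc] using h
      | true =>
          constructor
          · intro acc pos
            simpa [List.foldl, stepF, closedRes] using ih.2 acc pos (pos + 1)
          · intro acc s pos
            simpa [List.foldl, stepF, openRes] using ih.2 acc s (pos + 1)

theorem openRes_run (flags : List Bool) : ∀ (s pos : Int),
    openRes s flags pos =
      (if (flags.takeWhile (fun b => b)).length = flags.length then [[s, 0]]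
       else [s, pos + ((flags.takeWhile (fun b => b)).length : Int)] ::
         closedRes (flags.drop ((flags.takeWhile (fun b => b)).length + 1))
           (pos + ((flags.takeWhile (fun b => b)).length : Int) + 1)) := by
  induction flags with
  | nil => intro s pos; simp [openRes]
  | cons b rest ih =>
      intro s pos
      cases b with
      | false => simp [openRes]
      | true =>
          rw [show openRes s (true :: rest) pos = openRes s rest (pos + 1) from rfl, ih]
          simp only [List.takeWhile_cons, List.length_cons, List.drop_succ_cons]
          by_cases h : (rest.takeWhile (fun b => b)).length = rest.length
          · simp [h]
          · have h2 : ¬ ((rest.takeWhile (fun b => b)).length + 1 = rest.length + 1) := by omega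
            simp only [List.length_cons, h, h2, if_false, if_true]
            push_cast
            ring_nf

theorem altRuns_eq_closedRes : ∀ (flags : List Bool) (pos : Int),
    altRuns flags pos = closedRes flags pos := by
  intro flags pos
  induction flags, pos using altRuns.induct with
  | case1 pos => simp [altRuns, closedRes]
  | case2 rest pos ih => simpa [altRuns, closedRes] using ih
  | case3 rest pos k hk =>
      have hk' : (List.takeWhile (fun b => b) rest).length = rest.length := hk
      rw [altRuns.eq_def]
      simp [hk', closedRes, openRes_run]
  | case4 rest pos k hk ih =>
      rw [altRuns.eq_def]
      simp only [closedRes]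
      rw [openRes_run]
      have e1 : pos + ((rest.takeWhile (fun b => b)).length : Int) + 1
          = pos + 1 + ((rest.takeWhile (fun b => b)).length : Int) := by ring
      have e2 : pos + ((rest.takeWhile (fun b => b)).length : Int) + 2
          = pos + 1 + ((rest.takeWhile (fun b => b)).length : Int) + 1 := by ring
      have hk' : ¬ (List.takeWhile (fun b => b) rest).length = rest.length := hk
      have ih' : altRuns (rest.drop ((List.takeWhile (fun b => b) rest).length + 1))
          (pos + ((List.takeWhile (fun b => b) rest).length : Int) + 2)
          = closedRes (rest.drop ((List.takeWhile (fun b => b) rest).length + 1))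
          (pos + ((List.takeWhile (fun b => b) rest).length : Int) + 2) := ih
      rw [e2] at ih'
      simp [hk', e1, e2, ih']

-- ===== VERDICT (by name: the statement is the Claim_ definition above) =====
theorem detect_roi_spec : Claim_equal_detect_roi := by
  intro u_array c_array u_cutoff min_length _
  unfold Spec_detect_roi detect_roi detect_roi_alt
  dsimp only
  rw [foldA_eq_foldF, (foldF_char _).1 [] 1, altRuns_eq_closedRes]
  simp only [List.nil_append]
  rw [PySem.List.foldl_append_ite_eq_filter]
  simp
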